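-- pv_equiv track=rewrite | github.com/Sophiebdd/L_etagere_python | backend/app/services/recommendations.py | _pick_isbn
-- ===== SOURCE A (Python) =====
-- def _pick_isbn(identifiers: list[dict] | None) -> str | None:
--     if not identifiers:
--         return None
--     for isbn_type in ("ISBN_13", "ISBN_10"):
--         for item in identifiers:
--             if item.get("type") == isbn_type:
--                 return item.get("identifier")
--     return identifiers[0].get("identifier")
-- ===== SOURCE B (Python) =====
-- def _pick_isbn(identifiers: list[dict] | None) -> str | None:
--     if not identifiers:
--         return None
--     mapping = {}
--     for item in identifiers:
--         mapping.setdefault(item.get("type"), item.get("identifier"))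
--     if "ISBN_13" in mapping:
--         return mapping["ISBN_13"]
--     if "ISBN_10" in mapping:
--         return mapping["ISBN_10"]
--     return identifiers[0].get("identifier")
-- ===== Notes on version B (the rewrite author's own statement) =====
-- stated objective: idiomatic
-- what changed: Replaces A's two nested scans over identifiers (once per preferred ISBN type) with a single setdefault pass building a type->identifier dict of first occurrences, followed by key-membership lookups.
import Mathlib
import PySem

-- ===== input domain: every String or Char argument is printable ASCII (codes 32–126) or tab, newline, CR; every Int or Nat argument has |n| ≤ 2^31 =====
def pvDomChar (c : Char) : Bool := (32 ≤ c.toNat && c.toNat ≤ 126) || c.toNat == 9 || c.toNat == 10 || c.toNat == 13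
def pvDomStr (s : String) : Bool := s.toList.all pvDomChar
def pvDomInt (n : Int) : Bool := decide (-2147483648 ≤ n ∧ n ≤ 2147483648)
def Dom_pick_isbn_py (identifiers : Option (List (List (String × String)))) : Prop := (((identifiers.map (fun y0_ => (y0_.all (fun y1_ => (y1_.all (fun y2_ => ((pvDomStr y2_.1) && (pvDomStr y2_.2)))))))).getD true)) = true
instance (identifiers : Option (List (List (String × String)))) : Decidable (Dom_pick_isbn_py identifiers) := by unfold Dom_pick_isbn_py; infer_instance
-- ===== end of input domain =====

-- B replaces A's two nested scans by one setdefault pass building a type→identifier map (first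
-- occurrence kept), then key-membership lookups — idiomatic, same cost.


-- ===== PORT A =====
-- inner 'for item in identifiers: if item.get("type") == isbn_type: return item.get("identifier")'
-- (some r = an early return with value r; item.get(k) on an association-list dict = List.lookup)
def pickScanA (ids : List (List (String × String))) (t : String) : Option (Option String) :=
  match ids with
  | [] => none
  | it :: rest => if it.lookup "type" = some t then some (it.lookup "identifier") else pickScanA rest t

def pick_isbn_py (identifiers : Option (List (List (String × String)))) : Option String :=
  match identifiers with
  | none => none                                  -- 'if not identifiers'
  | some [] => none
  | some (first :: rest) =>
    -- for isbn_type in ("ISBN_13", "ISBN_10"): inner scan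
    match pickScanA (first :: rest) "ISBN_13" with
    | some r => r
    | none =>
      match pickScanA (first :: rest) "ISBN_10" with
      | some r => r
      | none => first.lookup "identifier"         -- identifiers[0].get("identifier")

-- ===== PORT B =====
def pick_isbn_py_alt (identifiers : Option (List (List (String × String)))) : Option String :=
  match identifiers with
  | none => none
  | some [] => none
  | some (first :: rest) =>
    -- mapping.setdefault(item.get("type"), item.get("identifier")) over all items
    let m : PySem.Dict (Option String) (Option String) :=
      (first :: rest).foldl
        (fun m it => m.setdefault (it.lookup "type") (it.lookup "identifier")) PySem.Dict.empty
    if m.contains (some "ISBN_13") then m.getD (some "ISBN_13") none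
    else if m.contains (some "ISBN_10") then m.getD (some "ISBN_10") none
    else first.lookup "identifier"

-- ===== PRECONDITION & SPEC =====
def Spec_pick_isbn_py (identifiers : Option (List (List (String × String)))) (out : Option String) : Prop := out = pick_isbn_py_alt identifiers
instance (identifiers : Option (List (List (String × String)))) (out : Option String) : Decidable (Spec_pick_isbn_py identifiers out) := by unfold Spec_pick_isbn_py; infer_instance

-- ===== CLAIM (what is proved, stated in full; the proofs are below) =====
def Claim_equal_pick_isbn_py : Prop := ∀ (identifiers : Option (List (List (String × String)))), Dom_pick_isbn_py identifiers → Spec_pick_isbn_py identifiers (pick_isbn_py identifiers)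

-- ===== LEMMAS AND PROOFS =====

-- the setdefault loop keeps the FIRST identifier seen for each type: its lookup is A's scan
theorem get?_foldl_setdefault (ids : List (List (String × String)))
    (m : PySem.Dict (Option String) (Option String)) (k : Option String) :
    (ids.foldl (fun m it => m.setdefault (it.lookup "type") (it.lookup "identifier")) m).get? k
      = match m.get? k with
        | some v => some v
        | none =>
          match ids.find? (fun it => it.lookup "type" == k) with
          | some it => some (it.lookup "identifier")
          | none => none := by
  induction ids generalizing m with
  | nil => rcases h : m.get? k with _ | v <;> simp [h]
  | cons it rest ih =>
    simp only [List.foldl_cons, List.find?_cons]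
    by_cases hc : m.contains (it.lookup "type") = true
    · rw [PySem.Dict.setdefault_of_contains _ _ hc, ih]
      rcases h : m.get? k with _ | v
      · have hne : (it.lookup "type" == k) = false := by
          rw [beq_eq_false_iff_ne]
          intro he
          rw [PySem.Dict.contains_eq_isSome_get?, he, h] at hc
          simp at hc
        simp [hne]
      · simp
    · rw [PySem.Dict.setdefault_of_not_contains _ _ (by simpa using hc), ih]
      rcases h : m.get? k with _ | v
      · by_cases he : it.lookup "type" = k
        · subst he
          simp [PySem.Dict.get?_insert_self]
        · rw [PySem.Dict.get?_insert_of_ne _ _ (Ne.symm he), h]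
          have hb : (it.lookup "type" == k) = false := by simp [he]
          simp [hb]
      · have he : it.lookup "type" ≠ k := by
          intro he
          rw [PySem.Dict.contains_eq_isSome_get?, he, h] at hc
          simp at hc
        rw [PySem.Dict.get?_insert_of_ne _ _ (Ne.symm he), h]

theorem pickScanA_eq_find? (ids : List (List (String × String))) (t : String) :
    pickScanA ids t
      = match ids.find? (fun it => it.lookup "type" == some t) with
        | some it => some (it.lookup "identifier")
        | none => none := by
  induction ids with
  | nil => rfl
  | cons it rest ih =>
    simp only [pickScanA, List.find?_cons]
    by_cases h : it.lookup "type" = some t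
    · simp [h]
    · have hb : (it.lookup "type" == some t) = false := by simp [h]
      simp [hb, ih, h]

-- ===== VERDICT (by name: the statement is the Claim_ definition above) =====
theorem pick_isbn_py_spec : Claim_equal_pick_isbn_py := by
  intro identifiers _
  unfold Spec_pick_isbn_py pick_isbn_py pick_isbn_py_alt
  rcases identifiers with _ | (_ | ⟨first, rest⟩)
  · rfl
  · rfl
  · simp only [PySem.Dict.contains_eq_isSome_get?, PySem.Dict.getD_eq_get?_getD,
      get?_foldl_setdefault, PySem.Dict.get?_empty, pickScanA_eq_find?]
    rcases h13 : (first :: rest).find? (fun it => it.lookup "type" == some "ISBN_13") with _ | it13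
    · rcases h10 : (first :: rest).find? (fun it => it.lookup "type" == some "ISBN_10") with _ | it10
      · simp [h13, h10]
      · simp [h13, h10]
    · simp [h13]
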